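-- pv_equiv track=rewrite | github.com/zsl24/Tacotron2-Mandarin-HiFiGAN | utils_1.py | replace_triple_space
-- ===== SOURCE A (Python) =====
-- def replace_triple_space(text):
--     res = ''
--     i = 0
--     while i < len(text):
--         j = i + 1
--         res += text[i]
--         if text[i] == ' ':
--             while j < len(text) and text[j] == ' ':
--                 j += 1
--             if j - i >= 2:
--                 res += ' '
--         i = j
--     return res
-- ===== SOURCE B (Python) =====
-- def replace_triple_space(text):
--     out = []
--     run = 0
--     for c in text:
--         if c == ' ':
--             run += 1
--             if run <= 2:
--                 out.append(' ')
--         else: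
--             run = 0
--             out.append(c)
--     return ''.join(out)
-- ===== Notes on version B (the rewrite author's own statement) =====
-- stated objective: simpler
-- what changed: Replaced index arithmetic with a nested inner while-loop by a single pass over the characters keeping a run-length counter, appending a space only while the current run is at most 2; output built as a list and joined instead of repeated string concatenation.
import Mathlib
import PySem

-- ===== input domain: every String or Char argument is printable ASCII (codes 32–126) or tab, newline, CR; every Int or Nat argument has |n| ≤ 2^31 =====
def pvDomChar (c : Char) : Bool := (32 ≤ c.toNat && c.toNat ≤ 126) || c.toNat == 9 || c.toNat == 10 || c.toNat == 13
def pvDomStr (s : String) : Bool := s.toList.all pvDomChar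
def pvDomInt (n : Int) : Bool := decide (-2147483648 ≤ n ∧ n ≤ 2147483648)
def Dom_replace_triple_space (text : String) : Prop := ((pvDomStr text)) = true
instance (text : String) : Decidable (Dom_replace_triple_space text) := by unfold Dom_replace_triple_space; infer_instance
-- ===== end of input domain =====

-- B replaces A's index arithmetic with a nested inner while-loop by a single pass
-- keeping a run-length counter (objective: simpler).

-- ===== PORT A =====
-- inner while loop: 'while j < len(text) and text[j] == " ": j += 1'
def rtsInner (cs : List Char) (j : Nat) : Nat :=
  if h : j < cs.length then
    if cs[j] = ' ' then rtsInner cs (j + 1) else j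
  else j
termination_by cs.length - j

-- the port's termination needs: the inner while never moves j backwards
theorem rtsInner_ge (cs : List Char) (j : Nat) : j ≤ rtsInner cs j := by
  unfold rtsInner
  split
  · split
    · exact le_trans (Nat.le_succ j) (rtsInner_ge cs (j + 1))
    · exact le_refl j
  · exact le_refl j
termination_by cs.length - j

-- outer while loop of A
def rtsLoop (cs : List Char) (i : Nat) (res : List Char) : List Char :=
  if h : i < cs.length then
    let j := i + 1
    let res1 := res ++ [cs[i]]
    if cs[i] = ' ' then
      let j2 := rtsInner cs j
      let res2 := if 2 ≤ j2 - i then res1 ++ [' '] else res1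
      rtsLoop cs j2 res2
    else
      rtsLoop cs j res1
  else res
termination_by cs.length - i
decreasing_by
  · have := rtsInner_ge cs (i + 1); omega
  · omega

def replace_triple_space (text : String) : String :=
  String.mk (rtsLoop text.toList 0 [])

-- ===== PORT B =====
-- one fold step of B's for-loop: state = (current run of spaces, output so far)
def rtsStep (st : Nat × List Char) (c : Char) : Nat × List Char :=
  if c = ' ' then
    let run := st.1 + 1
    (run, if run ≤ 2 then st.2 ++ [' '] else st.2)
  else
    (0, st.2 ++ [c])

def replace_triple_space_alt (text : String) : String :=
  String.mk ((text.toList.foldl rtsStep (0, [])).2)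

-- ===== PRECONDITION & SPEC =====
def Spec_replace_triple_space (text : String) (out : String) : Prop := out = replace_triple_space_alt text
instance (text : String) (out : String) : Decidable (Spec_replace_triple_space text out) := by unfold Spec_replace_triple_space; infer_instance

-- ===== CLAIM (what is proved, stated in full; the proofs are below) =====
def Claim_equal_replace_triple_space : Prop := ∀ (text : String), Dom_replace_triple_space text → Spec_replace_triple_space text (replace_triple_space text)

-- ===== LEMMAS AND PROOFS =====

-- common reference function: run-based collapse, recursion on the character list
def rtsG : Nat → List Char → List Char
  | _, [] => []
  | run, c :: rest =>
    if c = ' ' then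
      if run + 1 ≤ 2 then ' ' :: rtsG (run + 1) rest else rtsG (run + 1) rest
    else c :: rtsG 0 rest

theorem rts_drop_length_takeWhile (p : Char → Bool) (l : List Char) :
    l.drop (l.takeWhile p).length = l.dropWhile p := by
  induction l with
  | nil => rfl
  | cons c rest ih =>
    by_cases h : p c
    · simp [List.takeWhile_cons, List.dropWhile_cons, h, ih]
    · simp [List.takeWhile_cons, List.dropWhile_cons, h]

theorem rtsInner_eq (cs : List Char) (j : Nat) :
    rtsInner cs j = j + ((cs.drop j).takeWhile (fun c => c = ' ')).length := by
  unfold rtsInner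
  split
  case isTrue h =>
    have hdrop : cs.drop j = cs[j] :: cs.drop (j + 1) := List.drop_eq_getElem_cons h
    split
    case isTrue hsp =>
      rw [rtsInner_eq cs (j + 1), hdrop]
      simp [List.takeWhile_cons, hsp]
      omega
    case isFalse hsp =>
      rw [hdrop]
      simp [List.takeWhile_cons, hsp]
  case isFalse h =>
    have : cs.drop j = [] := List.drop_eq_nil_of_le (by omega)
    simp [this]
termination_by cs.length - j

theorem rtsG_big (l : List Char) (r : Nat) (hr : 2 ≤ r) :
    rtsG r l = rtsG 0 (l.dropWhile (fun c => c = ' ')) := by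
  induction l generalizing r with
  | nil => rfl
  | cons c rest ih =>
    by_cases h : c = ' '
    · have : ¬ (r + 1 ≤ 2) := by omega
      simp [rtsG, h, this, List.dropWhile_cons, ih (r + 1) (by omega)]
    · simp [rtsG, h, List.dropWhile_cons]

theorem rtsG_one (l : List Char) :
    rtsG 1 l = (if (l.takeWhile (fun c => c = ' ')) = [] then ([] : List Char) else [' '])
      ++ rtsG 0 (l.dropWhile (fun c => c = ' ')) := by
  cases l with
  | nil => rfl
  | cons c rest =>
    by_cases h : c = ' '
    · simp [rtsG, h, List.takeWhile_cons, List.dropWhile_cons, rtsG_big rest 2 (by omega)]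
    · simp [rtsG, h, List.takeWhile_cons, List.dropWhile_cons]

theorem rtsLoop_eq (cs : List Char) (i : Nat) (res : List Char) :
    rtsLoop cs i res = res ++ rtsG 0 (cs.drop i) := by
  rw [rtsLoop]
  split
  case isTrue h =>
    have hdrop : cs.drop i = cs[i] :: cs.drop (i + 1) := List.drop_eq_getElem_cons h
    by_cases hsp : cs[i] = ' '
    · simp only [hsp, if_pos]
      have hj2 := rtsInner_eq cs (i + 1)
      have hdrop2 : cs.drop (rtsInner cs (i + 1)) =
          (cs.drop (i + 1)).dropWhile (fun c => c = ' ') := by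
        rw [hj2, ← rts_drop_length_takeWhile (fun c => c = ' ') (cs.drop (i + 1)),
          List.drop_drop]
      rw [rtsLoop_eq cs (rtsInner cs (i + 1)), hdrop2, hdrop, hsp]
      have hgoal : rtsG 0 (' ' :: cs.drop (i + 1)) = ' ' :: rtsG 1 (cs.drop (i + 1)) := by
        simp [rtsG]
      rw [hgoal, rtsG_one]
      by_cases hc : (cs.drop (i + 1)).takeWhile (fun c => c = ' ') = []
      · have hno : ¬ 2 ≤ rtsInner cs (i + 1) - i := by rw [hj2, hc]; simp
        rw [if_neg hno, if_pos hc]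
        simp
      · have hlen : 0 < ((cs.drop (i + 1)).takeWhile (fun c => c = ' ')).length :=
          List.length_pos_of_ne_nil hc
        have hyes : 2 ≤ rtsInner cs (i + 1) - i := by rw [hj2]; omega
        rw [if_pos hyes, if_neg hc]
        simp
    · simp only [hsp, ite_false]
      rw [rtsLoop_eq cs (i + 1), hdrop]
      have : rtsG 0 (cs[i] :: cs.drop (i + 1)) = cs[i] :: rtsG 0 (cs.drop (i + 1)) := by
        simp [rtsG, hsp]
      rw [this]
      simp
  case isFalse h =>
    have : cs.drop i = [] := List.drop_eq_nil_of_le (by omega)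
    simp [this, rtsG]
termination_by cs.length - i
decreasing_by
  · have := rtsInner_ge cs (i + 1); omega
  · omega

theorem rtsFold_eq (l : List Char) (run : Nat) (acc : List Char) :
    (l.foldl rtsStep (run, acc)).2 = acc ++ rtsG run l := by
  induction l generalizing run acc with
  | nil => simp [rtsG]
  | cons c rest ih =>
    by_cases h : c = ' '
    · by_cases h2 : run + 1 ≤ 2
      · simp [rtsStep, rtsG, h, h2, ih]
      · simp [rtsStep, rtsG, h, h2, ih]
    · simp [rtsStep, rtsG, h, ih]

-- ===== VERDICT (by name: the statement is the Claim_ definition above) =====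
theorem replace_triple_space_spec : Claim_equal_replace_triple_space := by
  intro text _
  unfold Spec_replace_triple_space replace_triple_space replace_triple_space_alt
  rw [rtsLoop_eq, rtsFold_eq]
  simp
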